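-- pv_equiv track=rewrite | github.com/YangQwQ/manosaba_text_box | gui_settings.py | _convert_keyboard_lib_format
-- ===== SOURCE A (Python) =====
-- def _convert_keyboard_lib_format(hotkey_str):
--     """将keyboard库的热键字符串转换为我们的格式"""
--     if not hotkey_str:
--         return ""
--
--     parts = []
--     for part in hotkey_str.lower().split('+'):
--         part = part.strip()
--
--         # 处理修饰键
--         if part in ['ctrl', 'ctrl_l', 'ctrl_r']:
--             parts.append('ctrl')
--         elif part in ['alt', 'alt_l', 'alt_r']:
--             parts.append('alt')
--         elif part in ['shift', 'shift_l', 'shift_r']: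
--             parts.append('shift')
--         elif part in ['windows', 'win', 'win_l', 'win_r']:
--             parts.append('win')
--         elif len(part) == 1:
--             # 单个字符
--             parts.append(part)
--         elif part in ['left', 'right', 'up', 'down']:
--             # 方向键
--             parts.append(part)
--         elif part.startswith('f') and part[1:].isdigit():
--             # 功能键
--             parts.append(part)
--         else:
--             # 其他特殊键
--             parts.append(part)
--
--     return '+'.join(parts)
-- ===== SOURCE B (Python) =====
-- def _convert_keyboard_lib_format(hotkey_str):
--     """将keyboard库的热键字符串转换为我们的格式"""
--     if not hotkey_str:
--         return ""
--     out = ""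
--     first = True
--     word = ""
--     # single streaming pass: lower once, accumulate a token, flush at each '+'
--     for ch in hotkey_str.lower() + '+':
--         if ch == '+':
--             w = word.strip()
--             # canonicalise by suffix-stripping: drop '_l'/'_r' off a known modifier base
--             if (w.endswith('_l') or w.endswith('_r')) and w[:-2] in ('ctrl', 'alt', 'shift', 'win'):
--                 w = w[:-2]
--             elif w == 'windows':
--                 w = 'win'
--             out = w if first else out + '+' + w
--             first = False
--             word = ""
--         else:
--             word += ch
--     return out
-- ===== Notes on version B (the rewrite author's own statement) =====
-- stated objective: alternative
-- what changed: A lowercases, splits on the separator, maps each part through a four-way membership cascade and joins; B is a single streaming character pass that accumulates a token and at each separator flushes it, canonicalising by stripping an '_l'/'_r' suffix off a known modifier base (with 'windows'->'win') and appending directly to the output string with separators.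
import Mathlib
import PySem

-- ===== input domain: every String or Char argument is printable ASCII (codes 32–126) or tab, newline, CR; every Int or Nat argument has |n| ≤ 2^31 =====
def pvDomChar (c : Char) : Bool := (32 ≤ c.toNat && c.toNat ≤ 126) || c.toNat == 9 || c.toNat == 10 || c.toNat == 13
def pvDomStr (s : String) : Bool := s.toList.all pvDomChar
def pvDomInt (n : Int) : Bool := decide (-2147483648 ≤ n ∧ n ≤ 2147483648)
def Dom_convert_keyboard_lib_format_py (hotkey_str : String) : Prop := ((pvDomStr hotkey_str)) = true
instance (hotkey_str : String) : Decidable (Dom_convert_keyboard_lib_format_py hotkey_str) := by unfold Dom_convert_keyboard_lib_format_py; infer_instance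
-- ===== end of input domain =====

-- B replaces A's split/map-with-cascade/join by one streaming character pass that flushes
-- suffix-normalised tokens at each separator (objective: alternative; repeated concatenation makes B no faster).

-- ===== PORT A =====
-- literal port of A's per-part if/elif cascade (on the code-point list side)
def pvBranchA (p : List Char) : List Char :=
  if p ∈ ["ctrl".toList, "ctrl_l".toList, "ctrl_r".toList] then "ctrl".toList
  else if p ∈ ["alt".toList, "alt_l".toList, "alt_r".toList] then "alt".toList
  else if p ∈ ["shift".toList, "shift_l".toList, "shift_r".toList] then "shift".toList
  else if p ∈ ["windows".toList, "win".toList, "win_l".toList, "win_r".toList] then "win".toList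
  else if PySem.Chars.len p == 1 then p
  else if p ∈ ["left".toList, "right".toList, "up".toList, "down".toList] then p
  else if PySem.Chars.startswith p ['f'] && PySem.Chars.strIsdigit (PySem.Chars.slice p (some 1) none) then p
  else p

def convert_keyboard_lib_format_py (hotkey_str : String) : String :=
  if hotkey_str = "" then ""
  else
    -- parts built by the for-loop (append one normalised part per split piece), then '+'.join
    let parts := (PySem.Chars.splitOn (PySem.Chars.lower hotkey_str.toList) ['+']).foldl
      (fun acc part => acc ++ [pvBranchA (PySem.Chars.strip part)]) ([] : List (List Char))
    String.ofList (PySem.Chars.join ['+'] parts)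

-- ===== PORT B =====
def pvBases : List (List Char) := ["ctrl".toList, "alt".toList, "shift".toList, "win".toList]

-- Source B's per-token normalisation: strip a '_l'/'_r' suffix off a known base; 'windows' -> 'win'
def pvNormB (w : List Char) : List Char :=
  if ((PySem.Chars.endswith w ['_', 'l'] || PySem.Chars.endswith w ['_', 'r']) = true)
      ∧ PySem.Chars.slice w none (some (-2)) ∈ pvBases then
    PySem.Chars.slice w none (some (-2))
  else if w = "windows".toList then "win".toList
  else w

-- Source B's for-loop: state (word, first, out)
def pvScanB : List Char → List Char → Bool → List Char → List Char
  | [], _, _, out => out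
  | c :: rest, word, first, out =>
    if c = '+' then
      let w := pvNormB (PySem.Chars.strip word)
      pvScanB rest [] false (if first then w else out ++ '+' :: w)
    else pvScanB rest (word ++ [c]) first out

def convert_keyboard_lib_format_py_alt (hotkey_str : String) : String :=
  if hotkey_str = "" then ""
  else String.ofList (pvScanB (PySem.Chars.lower hotkey_str.toList ++ ['+']) [] true [])

-- ===== PRECONDITION & SPEC =====
def Spec_convert_keyboard_lib_format_py (hotkey_str : String) (out : String) : Prop := out = convert_keyboard_lib_format_py_alt hotkey_str
instance (hotkey_str : String) (out : String) : Decidable (Spec_convert_keyboard_lib_format_py hotkey_str out) := by unfold Spec_convert_keyboard_lib_format_py; infer_instance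

-- ===== CLAIM (what is proved, stated in full; the proofs are below) =====
def Claim_equal_convert_keyboard_lib_format_py : Prop := ∀ (hotkey_str : String), Dom_convert_keyboard_lib_format_py hotkey_str → Spec_convert_keyboard_lib_format_py hotkey_str (convert_keyboard_lib_format_py hotkey_str)

-- ===== LEMMAS AND PROOFS =====

-- PySem's Python split on a one-char separator is Mathlib's List.splitOn.
theorem pvGo_splitOn (c : Char) :
    ∀ (fuel : Nat) (l cur : List Char) (acc : List (List Char)), l.length ≤ fuel →
      PySem.Chars.splitOn.go [c] fuel l cur acc
        = acc.reverse ++ (List.splitOn c l).modifyHead (cur.reverse ++ ·) := by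
  intro fuel
  induction fuel with
  | zero =>
    intro l cur acc h
    have hl : l = [] := List.eq_nil_of_length_eq_zero (Nat.le_zero.mp h)
    subst hl
    rw [PySem.Chars.splitOn.go]
    simp [List.splitOn]
  | succ fuel ih =>
    intro l cur acc h
    cases l with
    | nil =>
      rw [PySem.Chars.splitOn.go]
      simp [List.splitOn]
      all_goals omega
    | cons c' rest =>
      rw [PySem.Chars.splitOn.go]
      obtain ⟨hd, tl, hsp⟩ := List.exists_cons_of_ne_nil (List.splitOnP_ne_nil (· == c) rest)
      have hsp' : List.splitOn c rest = hd :: tl := hsp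
      by_cases hc : c' = c
      · subst hc
        have hpre : [c'].isPrefixOf (c' :: rest) = true := by simp [List.isPrefixOf]
        rw [if_pos hpre]
        have hdrop : List.drop [c'].length (c' :: rest) = rest := by simp
        rw [hdrop, ih rest [] (cur.reverse :: acc) (by simpa using Nat.le_of_succ_le_succ h)]
        have hcons : List.splitOn c' (c' :: rest) = [] :: List.splitOn c' rest := by
          simp [List.splitOn, List.splitOnP_cons]
        rw [hcons, hsp']
        simp
      · have hbeq : (c == c') = false := by
          simp only [beq_eq_false_iff_ne, ne_eq]
          exact fun he => hc he.symm
        have hpre : ([c].isPrefixOf (c' :: rest)) = false := by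
          simp [List.isPrefixOf, hbeq]
        rw [if_neg (by simp [hpre])]
        rw [ih rest (c' :: cur) acc (by simpa using Nat.le_of_succ_le_succ h)]
        have hcons : List.splitOn c (c' :: rest) = (List.splitOn c rest).modifyHead (c' :: ·) := by
          simp [List.splitOn, List.splitOnP_cons, hc]
        rw [hcons, hsp']
        simp

theorem pvSplitOn_eq (c : Char) (l : List Char) :
    PySem.Chars.splitOn l [c] = List.splitOn c l := by
  show PySem.Chars.splitOn.go [c] (l.length + 1) l [] [] = _
  rw [pvGo_splitOn c (l.length + 1) l [] [] (by omega)]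
  obtain ⟨hd, tl, hsp⟩ := List.exists_cons_of_ne_nil (List.splitOnP_ne_nil (· == c) l)
  have hsp' : List.splitOn c l = hd :: tl := hsp
  rw [hsp']
  simp

-- splitting facts for lists without the separator
theorem pvSplitOn_no_sep (c : Char) (l : List Char) (h : c ∉ l) :
    List.splitOn c l = [l] := by
  show List.splitOnP _ _ = _
  rw [List.splitOnP_eq_single]
  intro x hx
  simp only [beq_iff_eq]
  exact fun he => h (he ▸ hx)

theorem pvSplitOn_append (c : Char) (w rest : List Char) (h : c ∉ w) :
    List.splitOn c (w ++ c :: rest) = w :: List.splitOn c rest := by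
  show List.splitOnP _ _ = _
  rw [List.splitOnP_first]
  · rfl
  · intro x hx
    simp only [beq_iff_eq]
    exact fun he => h (he ▸ hx)
  · simp

-- '+'.join for a non-empty tail
theorem pvJoin_cons (x : List Char) (ts : List (List Char)) (h : ts ≠ []) :
    PySem.Chars.join ['+'] (x :: ts) = x ++ '+' :: PySem.Chars.join ['+'] ts := by
  cases ts with
  | nil => exact absurd rfl h
  | cons b l => rw [PySem.Chars.join_cons_cons]; simp

-- A's cascade equals B's suffix-stripping rule on every token.
theorem pvBranchA_eq_norm (p : List Char) : pvBranchA p = pvNormB p := by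
  by_cases h1 : p ∈ ["ctrl".toList, "ctrl_l".toList, "ctrl_r".toList]
  · simp only [List.mem_cons, List.not_mem_nil, or_false] at h1
    rcases h1 with rfl | rfl | rfl <;> decide
  by_cases h2 : p ∈ ["alt".toList, "alt_l".toList, "alt_r".toList]
  · simp only [List.mem_cons, List.not_mem_nil, or_false] at h2
    rcases h2 with rfl | rfl | rfl <;> decide
  by_cases h3 : p ∈ ["shift".toList, "shift_l".toList, "shift_r".toList]
  · simp only [List.mem_cons, List.not_mem_nil, or_false] at h3
    rcases h3 with rfl | rfl | rfl <;> decide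
  by_cases h4 : p ∈ ["windows".toList, "win".toList, "win_l".toList, "win_r".toList]
  · simp only [List.mem_cons, List.not_mem_nil, or_false] at h4
    rcases h4 with rfl | rfl | rfl | rfl <;> decide
  · have hA : pvBranchA p = p := by
      unfold pvBranchA
      rw [if_neg h1, if_neg h2, if_neg h3, if_neg h4]
      split_ifs <;> rfl
    have hB : pvNormB p = p := by
      unfold pvNormB
      rw [if_neg, if_neg]
      · exact fun hw => h4 (by simp [hw])
      · rintro ⟨hsuf, hmem⟩
        have hslice : PySem.Chars.slice p none (some (-2)) = p.take (p.length - 2) := by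
          rw [PySem.Chars.slice_eq_listSlice, PySem.List.slice_to_neg_ofNat p 2 (by omega)]
        rw [hslice] at hmem
        rcases Bool.or_eq_true_iff.mp hsuf with hl | hr
        · obtain ⟨t, ht⟩ := (PySem.Chars.endswith_iff p ['_', 'l']).mp hl
          subst ht
          have htake : (t ++ ['_', 'l']).take ((t ++ ['_', 'l']).length - 2) = t := by
            simp
          rw [htake] at hmem
          simp only [pvBases, List.mem_cons, List.not_mem_nil, or_false] at hmem
          rcases hmem with rfl | rfl | rfl | rfl
          · exact h1 (by decide)
          · exact h2 (by decide)
          · exact h3 (by decide)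
          · exact h4 (by decide)
        · obtain ⟨t, ht⟩ := (PySem.Chars.endswith_iff p ['_', 'r']).mp hr
          subst ht
          have htake : (t ++ ['_', 'r']).take ((t ++ ['_', 'r']).length - 2) = t := by
            simp
          rw [htake] at hmem
          simp only [pvBases, List.mem_cons, List.not_mem_nil, or_false] at hmem
          rcases hmem with rfl | rfl | rfl | rfl
          · exact h1 (by decide)
          · exact h2 (by decide)
          · exact h3 (by decide)
          · exact h4 (by decide)
    rw [hA, hB]

-- B's scan computes '+'.join of the normalised split pieces.
theorem pvScanB_spec :
    ∀ (cs word out : List Char) (first : Bool), '+' ∉ word →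
      pvScanB (cs ++ ['+']) word first out
        = (if first then ([] : List Char) else out ++ ['+'])
            ++ PySem.Chars.join ['+']
                ((List.splitOn '+' (word ++ cs)).map (fun t => pvNormB (PySem.Chars.strip t))) := by
  intro cs
  induction cs with
  | nil =>
    intro word out first hw
    simp only [List.nil_append, List.append_nil]
    rw [pvScanB, pvScanB]
    rw [pvSplitOn_no_sep '+' word hw]
    simp only [List.map_cons, List.map_nil, PySem.Chars.join_singleton]
    cases first <;> simp
  | cons c rest ih =>
    intro word out first hw
    by_cases hc : c = '+'
    · subst hc
      rw [List.cons_append, pvScanB, if_pos rfl]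
      rw [ih [] _ false (by simp)]
      rw [pvSplitOn_append '+' word rest hw, List.map_cons]
      rw [pvJoin_cons _ _ (by
        simp only [ne_eq, List.map_eq_nil_iff]
        exact List.splitOnP_ne_nil _ _)]
      simp only [List.nil_append, if_neg Bool.false_ne_true]
      cases first <;> simp
    · rw [List.cons_append, pvScanB, if_neg hc]
      rw [ih (word ++ [c]) out first (by simp [hw]; exact fun he => hc he.symm)]
      simp

-- ===== VERDICT (by name: the statement is the Claim_ definition above) =====
theorem convert_keyboard_lib_format_py_spec : Claim_equal_convert_keyboard_lib_format_py := by
  intro s _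
  unfold Spec_convert_keyboard_lib_format_py convert_keyboard_lib_format_py convert_keyboard_lib_format_py_alt
  by_cases h : s = ""
  · simp [h]
  · simp only [h, if_false]
    rw [PySem.List.foldl_append_singleton_eq_map, pvSplitOn_eq,
        pvScanB_spec (PySem.Chars.lower s.toList) [] [] true (by simp)]
    simp [pvBranchA_eq_norm]
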